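-- pv_equiv track=rewrite | github.com/jlfme/myspider | myspider/myhttp/cookies.py | potential_domain_matches
-- ===== SOURCE A (Python) =====
-- def potential_domain_matches(domain):
--     """Potential domain matches for a cookie
--
--     >>> potential_domain_matches('www.example.com')
--     ['www.example.com', 'example.com', '.www.example.com', '.example.com']
--
--     """
--     matches = [domain]
--     try:
--         start = domain.index('.') + 1
--         end = domain.rindex('.')
--         while start < end:
--             matches.append(domain[start:])
--             start = domain.index('.', start) + 1
--     except ValueError:
--         pass
--     return matches + ['.' + d for d in matches]
-- ===== SOURCE B (Python) =====
-- def potential_domain_matches(domain):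
--     """Potential domain matches for a cookie (single comprehension over dot positions)."""
--     last = domain.rfind('.')
--     matches = [domain] + [domain[p + 1:] for p in range(max(last - 1, 0)) if domain[p] == '.']
--     return matches + ['.' + d for d in matches]
-- ===== Notes on version B (the rewrite author's own statement) =====
-- stated objective: simpler
-- what changed: Replaces the try/except driven while loop that chases successive index('.') positions with a single list comprehension collecting the suffix after every dot whose position is below rfind('.') - 1.
import Mathlib
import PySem

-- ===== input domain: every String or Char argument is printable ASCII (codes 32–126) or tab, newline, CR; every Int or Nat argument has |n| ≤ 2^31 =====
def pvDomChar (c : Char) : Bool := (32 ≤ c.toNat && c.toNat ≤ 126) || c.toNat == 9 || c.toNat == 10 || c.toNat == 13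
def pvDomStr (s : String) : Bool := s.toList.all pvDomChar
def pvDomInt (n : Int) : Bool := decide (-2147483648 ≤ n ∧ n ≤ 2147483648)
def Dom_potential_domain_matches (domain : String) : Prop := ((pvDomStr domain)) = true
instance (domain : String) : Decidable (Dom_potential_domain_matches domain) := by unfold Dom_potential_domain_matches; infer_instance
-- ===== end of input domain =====

-- B replaces A's try/except while loop chasing successive index('.') positions by one
-- comprehension over the dot positions below rfind('.') - 1 (objective: simpler; same cost).

-- ===== PORT A =====
-- the 'while start < end: matches.append(domain[start:]); start = domain.index('.', start) + 1'
-- loop; findFrom = -1 is Python's ValueError from index, caught by the 'except' (loop state kept);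
-- fuel is supplied at the call site as (end - start).toNat + 1, which the proof shows suffices
def pvLoopA (cs : List Char) (e : Int) : Nat → Int → List (List Char) → List (List Char)
  | 0, _, acc => acc
  | fuel + 1, start, acc =>
    if start < e then
      let acc' := acc ++ [PySem.Chars.slice cs (some start) none]
      let i := PySem.Chars.findFrom cs ['.'] start none
      if i = -1 then acc' else pvLoopA cs e fuel (i + 1) acc'
    else acc

def potential_domain_matches (domain : String) : List String :=
  let cs := domain.toList
  let i := PySem.Chars.find cs ['.']          -- domain.index('.'): -1 = ValueError → except: pass
  let ms : List (List Char) :=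
    if i = -1 then [cs]
    else
      let start := i + 1
      let e := PySem.Chars.rfind cs ['.']     -- domain.rindex('.'): a dot exists, so no ValueError
      pvLoopA cs e ((e - start).toNat + 1) start [cs]
  (ms ++ ms.map (fun d => '.' :: d)).map String.ofList

-- ===== PORT B =====
def potential_domain_matches_alt (domain : String) : List String :=
  let cs := domain.toList
  let last := PySem.Chars.rfind cs ['.']      -- domain.rfind('.')
  let ms : List (List Char) :=
    cs :: (PySem.List.pyRange 0 (max (last - 1) 0) 1).filterMap
      (fun p => if PySem.Chars.pyGet? cs p = some '.' then
                  some (PySem.Chars.slice cs (some (p + 1)) none)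
                else none)
  (ms ++ ms.map (fun d => '.' :: d)).map String.ofList

-- ===== PRECONDITION & SPEC =====
def Spec_potential_domain_matches (domain : String) (out : List String) : Prop := out = potential_domain_matches_alt domain
instance (domain : String) (out : List String) : Decidable (Spec_potential_domain_matches domain out) := by unfold Spec_potential_domain_matches; infer_instance

-- ===== CLAIM (what is proved, stated in full; the proofs are below) =====
def Claim_equal_potential_domain_matches : Prop := ∀ (domain : String), Dom_potential_domain_matches domain → Spec_potential_domain_matches domain (potential_domain_matches domain)

-- ===== LEMMAS AND PROOFS =====

-- positions p ≥ q of a '.' in cs with p + 1 < e, in increasing order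
def pvDots (cs : List Char) (q : Nat) (e : Int) : List Nat :=
  (List.range cs.length).filter
    (fun p => decide (q ≤ p) && decide ((p : Int) + 1 < e) && decide (cs[p]? = some '.'))

theorem pv_singleton_prefix (c : Char) (l : List Char) : ([c] <+: l) ↔ l.head? = some c := by
  cases l with
  | nil => simp
  | cons x xs => simp [List.cons_prefix_cons, eq_comm]

theorem pv_prefix_drop (cs : List Char) (k : Nat) :
    (['.'] <+: cs.drop k) ↔ cs[k]? = some '.' := by
  rw [pv_singleton_prefix, List.head?_drop]

theorem pv_slice_from (cs : List Char) (n : Nat) :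
    PySem.Chars.slice cs (some (n : Int)) none = cs.drop n := by
  simp [PySem.List.slice_from_natCast]

theorem mem_pvDots {cs : List Char} {q : Nat} {e : Int} {p : Nat} :
    p ∈ pvDots cs q e ↔ q ≤ p ∧ (p : Int) + 1 < e ∧ cs[p]? = some '.' := by
  simp only [pvDots, List.mem_filter, List.mem_range, Bool.and_eq_true, decide_eq_true_eq]
  constructor
  · rintro ⟨_, ⟨h1, h2⟩, h3⟩; exact ⟨h1, h2, h3⟩
  · rintro ⟨h1, h2, h3⟩
    have hlt : p < cs.length := by
      rcases List.getElem?_eq_some_iff.1 h3 with ⟨h, _⟩; exact h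
    exact ⟨hlt, ⟨h1, h2⟩, h3⟩

theorem pvDots_pairwise (cs : List Char) (q : Nat) (e : Int) :
    (pvDots cs q e).Pairwise (· < ·) :=
  (List.pairwise_lt_range).filter _

theorem pv_eq_of_pairwise {l1 l2 : List Nat}
    (h1 : l1.Pairwise (· < ·)) (h2 : l2.Pairwise (· < ·))
    (h : ∀ x, x ∈ l1 ↔ x ∈ l2) : l1 = l2 := by
  have hp : l1.Perm l2 := (List.perm_ext_iff_of_nodup h1.nodup h2.nodup).2 h
  exact hp.eq_of_pairwise (fun a b _ _ hab hba => le_antisymm hab.le hba.le) h1 h2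

theorem pvDots_nil_of_ge {cs : List Char} {q : Nat} {e : Int} (h : e ≤ (q : Int) + 1) :
    pvDots cs q e = [] := by
  apply List.eq_nil_iff_forall_not_mem.2
  intro p hp
  rcases mem_pvDots.1 hp with ⟨h1, h2, _⟩
  omega

theorem pvDots_nil_of_nodot {cs : List Char} {q : Nat} {e : Int}
    (h : ∀ p : Nat, cs[p]? ≠ some '.') : pvDots cs q e = [] := by
  apply List.eq_nil_iff_forall_not_mem.2
  intro p hp
  exact h p (mem_pvDots.1 hp).2.2

theorem pvDots_cons {cs : List Char} {q i : Nat} {e : Int}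
    (hq : cs[q]? = some '.') (he : (q : Int) + 1 < e) (hqi : q < i)
    (hmid : ∀ p : Nat, q < p → p < i → cs[p]? ≠ some '.') :
    pvDots cs q e = q :: pvDots cs i e := by
  apply pv_eq_of_pairwise (pvDots_pairwise _ _ _)
  · exact List.pairwise_cons.2 ⟨fun p hp => by have := (mem_pvDots.1 hp).1; omega,
      pvDots_pairwise _ _ _⟩
  · intro x
    simp only [mem_pvDots, List.mem_cons]
    constructor
    · rintro ⟨h1, h2, h3⟩
      by_cases hx : x = q
      · exact Or.inl hx
      · refine Or.inr ⟨?_, h2, h3⟩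
        by_contra hlt
        exact hmid x (by omega) (by omega) h3
    · rintro (rfl | ⟨h1, h2, h3⟩)
      · exact ⟨le_refl _, he, hq⟩
      · exact ⟨by omega, h2, h3⟩

theorem pvDots_single {cs : List Char} {q : Nat} {e : Int}
    (hq : cs[q]? = some '.') (he : (q : Int) + 1 < e)
    (hnone : ∀ p : Nat, q < p → cs[p]? ≠ some '.') :
    pvDots cs q e = [q] := by
  apply pv_eq_of_pairwise (pvDots_pairwise _ _ _) (List.pairwise_singleton _ _)
  intro x
  simp only [mem_pvDots, List.mem_singleton]
  constructor
  · rintro ⟨h1, h2, h3⟩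
    by_contra hx
    exact hnone x (by omega) h3
  · rintro rfl
    exact ⟨le_refl _, he, hq⟩

theorem pvDots_congr_first {cs : List Char} {f : Nat} {e : Int}
    (hfirst : ∀ j : Nat, j < f → cs[j]? ≠ some '.') :
    pvDots cs f e = pvDots cs 0 e := by
  apply pv_eq_of_pairwise (pvDots_pairwise _ _ _) (pvDots_pairwise _ _ _)
  intro x
  simp only [mem_pvDots]
  constructor
  · rintro ⟨h1, h2, h3⟩; exact ⟨Nat.zero_le _, h2, h3⟩
  · rintro ⟨_, h2, h3⟩
    refine ⟨?_, h2, h3⟩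
    by_contra hlt
    exact hfirst x (by omega) h3

theorem pvLoopA_spec (cs : List Char) (e : Int) :
    ∀ (fuel : Nat) (s : Nat) (acc : List (List Char)), 1 ≤ s → s ≤ cs.length →
      cs[s - 1]? = some '.' → (e - (s : Int)).toNat < fuel →
      pvLoopA cs e fuel (s : Int) acc =
        acc ++ (pvDots cs (s - 1) e).map (fun p => cs.drop (p + 1)) := by
  intro fuel
  induction fuel with
  | zero => intro s acc _ _ _ hfuel; omega
  | succ fuel ih =>
    intro s acc hs1 hslen hdot hfuel
    have hss : s - 1 + 1 = s := Nat.sub_add_cancel hs1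
    show (if (s : Int) < e then _ else acc) = _
    by_cases hlt : (s : Int) < e
    · rw [if_pos hlt]
      by_cases hnf : PySem.Chars.findFrom cs ['.'] (s : Int) none = -1
      · simp only [hnf, pv_slice_from]
        have hnodot : ∀ p : Nat, s - 1 < p → cs[p]? ≠ some '.' := by
          intro p hp hc
          have hinf : ('.' : Char) ∈ cs.drop s := by
            have hg : (cs.drop s)[p - s]? = some '.' := by
              rw [List.getElem?_drop]
              have hsp : s + (p - s) = p := by omega
              rw [hsp]; exact hc
            exact List.mem_of_getElem? hg
          have := (PySem.Chars.findFrom_natCast_eq_neg_one_iff cs ['.'] s hslen).1 hnf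
          exact this (List.singleton_infix_iff _ _ |>.2 hinf)
        rw [pvDots_single hdot (by omega) hnodot]
        simp [hss]
      · rw [if_neg hnf]
        obtain ⟨hge, hpre, hmin⟩ := PySem.Chars.findFrom_natCast_spec cs ['.'] s hslen hnf
        set i := PySem.Chars.findFrom cs ['.'] (s : Int) none with hi
        have hdi : cs[i.toNat]? = some '.' := (pv_prefix_drop cs i.toNat).1 hpre
        have hilen : i.toNat < cs.length := by
          rcases List.getElem?_eq_some_iff.1 hdi with ⟨h, _⟩; exact h
        have hcast : i + 1 = ((i.toNat + 1 : Nat) : Int) := by omega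
        rw [hcast, ih (i.toNat + 1) _ (by omega) (by omega)
              (by simpa using hdi) (by omega)]
        have hmid : ∀ p : Nat, s - 1 < p → p < i.toNat → cs[p]? ≠ some '.' := by
          intro p hp1 hp2 hc
          by_cases hps : s ≤ p
          · exact hmin p (by exact_mod_cast hps) hp2 ((pv_prefix_drop cs p).2 hc)
          · omega
        rw [pvDots_cons hdot (by omega) (by omega) hmid]
        simp [hss]
    · rw [if_neg hlt]
      rw [pvDots_nil_of_ge (by omega)]
      simp

theorem pv_filterMap_if {α β : Type} (l : List α) (pr : α → Prop) [DecidablePred pr] (f : α → β) :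
    l.filterMap (fun x => if pr x then some (f x) else none) =
      (l.filter (fun x => decide (pr x))).map f := by
  induction l with
  | nil => rfl
  | cons x xs ih =>
    by_cases h : pr x
    · simp [h, ih]
    · simp [h, ih]

-- A's matches list equals cs :: the suffixes after the dots of pvDots cs 0 (rfind cs ['.'])
theorem pvA_matches (cs : List Char) :
    (if PySem.Chars.find cs ['.'] = -1 then [cs]
     else pvLoopA cs (PySem.Chars.rfind cs ['.'])
            ((PySem.Chars.rfind cs ['.'] - (PySem.Chars.find cs ['.'] + 1)).toNat + 1)
            (PySem.Chars.find cs ['.'] + 1) [cs]) =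
    cs :: (pvDots cs 0 (PySem.Chars.rfind cs ['.'])).map (fun p => cs.drop (p + 1)) := by
  by_cases hf : PySem.Chars.find cs ['.'] = -1
  · simp only [hf]
    have hnodot : ∀ p : Nat, cs[p]? ≠ some '.' := by
      intro p hc
      have hm : ('.' : Char) ∈ cs := List.mem_of_getElem? hc
      exact (PySem.Chars.find_eq_neg_one_iff cs ['.']).1 hf
        (List.singleton_infix_iff _ _ |>.2 hm)
    rw [pvDots_nil_of_nodot hnodot]
    simp
  · rw [if_neg hf]
    have hpos : 0 ≤ PySem.Chars.find cs ['.'] := by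
      have := PySem.Chars.neg_one_le_find cs ['.']
      omega
    obtain ⟨hpre, hmin⟩ := PySem.Chars.find_spec (s := cs) (sub := ['.']) hpos
    set f := PySem.Chars.find cs ['.'] with hfdef
    have hdf : cs[f.toNat]? = some '.' := (pv_prefix_drop cs f.toNat).1 hpre
    have hflen : f.toNat < cs.length := by
      rcases List.getElem?_eq_some_iff.1 hdf with ⟨h, _⟩; exact h
    have hcast : f + 1 = ((f.toNat + 1 : Nat) : Int) := by omega
    rw [hcast, pvLoopA_spec cs _ _ (f.toNat + 1) [cs] (by omega) (by omega)
          (by simpa using hdf) (by omega)]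
    rw [show f.toNat + 1 - 1 = f.toNat from rfl]
    rw [pvDots_congr_first (fun j hj hc => hmin j hj ((pv_prefix_drop cs j).2 hc))]
    rfl

-- B's filterMap over the range equals the same mapped pvDots list
theorem pvB_matches (cs : List Char) :
    (PySem.List.pyRange 0 (max (PySem.Chars.rfind cs ['.'] - 1) 0) 1).filterMap
      (fun p => if PySem.Chars.pyGet? cs p = some '.' then
                  some (PySem.Chars.slice cs (some (p + 1)) none)
                else none) =
    (pvDots cs 0 (PySem.Chars.rfind cs ['.'])).map (fun p => cs.drop (p + 1)) := by
  set e := PySem.Chars.rfind cs ['.'] with he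
  rw [PySem.List.pyRange_one, List.filterMap_map]
  have hfun : ((fun p => if PySem.Chars.pyGet? cs p = some '.' then
          some (PySem.Chars.slice cs (some (p + 1)) none) else none) ∘
        (fun k : Nat => (0 : Int) + (k : Int))) =
      (fun p : Nat => if cs[p]? = some '.' then some (cs.drop (p + 1)) else none) := by
    funext k
    simp only [Function.comp_apply, zero_add]
    by_cases hc : cs[k]? = some '.'
    · rw [if_pos (by simpa using hc), if_pos hc]
      rw [show (k : Int) + 1 = ((k + 1 : Nat) : Int) by omega]
      exact congrArg some (pv_slice_from cs (k + 1))
    · rw [if_neg (by simpa using hc), if_neg hc]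
  rw [hfun, pv_filterMap_if]
  congr 1
  apply pv_eq_of_pairwise ((List.pairwise_lt_range).filter _) (pvDots_pairwise _ _ _)
  intro p
  simp only [List.mem_filter, List.mem_range, mem_pvDots, decide_eq_true_eq]
  constructor
  · rintro ⟨hp, hc⟩
    refine ⟨Nat.zero_le _, by omega, hc⟩
  · rintro ⟨_, hlt, hc⟩
    exact ⟨by omega, hc⟩

-- ===== VERDICT (by name: the statement is the Claim_ definition above) =====
theorem potential_domain_matches_spec : Claim_equal_potential_domain_matches := by
  intro domain _
  show potential_domain_matches domain = potential_domain_matches_alt domain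
  simp only [potential_domain_matches, potential_domain_matches_alt]
  rw [pvA_matches domain.toList, ← pvB_matches domain.toList]
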